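-- pv_equiv track=rewrite | github.com/ASSERT-KTH/Mokav | experiments/pynguin/c4b/return-lst/generated_tests/src_2211/4/src_2211.py | func
-- ===== SOURCE A (Python) =====
-- def func(*args):
-- 	ret_values = []
--
--
-- 	def is_lucky(num):
-- 	    num_s = str(num)
-- 	    for ch in num_s:
-- 	        if (ch not in '47'):
-- 	            return False
-- 	    return True
-- 	N = 1000
-- 	n = int(args[0])
-- 	if is_lucky(n):
-- 	    ret_values.append('YES')
-- 	else:
-- 	    for i in range(4, (N + 1)):
-- 	        if (is_lucky(i) and ((n % i) == 0)):
-- 	            ret_values.append('YES')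
-- 	            break
-- 	    else:
-- 	        ret_values.append('NO')
--
-- 	return ret_values
-- ===== SOURCE B (Python) =====
-- def func(*args):
--     n = int(args[0])
--     if set(str(n)) <= set('47'):
--         return ['YES']
--     one = [4, 7]
--     two = [10 * a + b for a in one for b in one]
--     three = [10 * a + b for a in two for b in one]
--     return ['YES' if any(n % d == 0 for d in one + two + three) else 'NO']
-- ===== Notes on version B (the rewrite author's own statement) =====
-- stated objective: simpler
-- what changed: B generates the lucky numbers in A's search range directly by digit extension (one-, two- and three-digit combinations of the lucky digits) and tests divisibility against that short list, instead of A's scan of every integer in the range with a per-integer luckiness test inside the loop.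
import Mathlib
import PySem

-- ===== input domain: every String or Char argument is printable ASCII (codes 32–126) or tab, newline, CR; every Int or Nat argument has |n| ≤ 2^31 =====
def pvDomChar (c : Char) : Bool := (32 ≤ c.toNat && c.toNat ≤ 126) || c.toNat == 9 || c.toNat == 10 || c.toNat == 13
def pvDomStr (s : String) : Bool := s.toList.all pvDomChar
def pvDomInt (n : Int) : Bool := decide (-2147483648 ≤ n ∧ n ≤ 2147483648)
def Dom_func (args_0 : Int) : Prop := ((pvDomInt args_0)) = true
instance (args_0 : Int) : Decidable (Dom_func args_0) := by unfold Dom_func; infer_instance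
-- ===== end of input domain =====

-- B replaces A's scan of the whole search range (testing each integer for luckiness) by directly
-- generating the lucky numbers of the range digit-by-digit; objective: simpler.

-- ===== PORT A =====
-- for ch in num_s: if ch not in '47': return False / return True
def isLuckyA_go : List Char → Bool
  | [] => true
  | c :: cs => if !(c == '4' || c == '7') then false else isLuckyA_go cs

def isLuckyA (num : Int) : Bool := isLuckyA_go (PySem.Int.toChars num)

-- the for/break/else loop: first YES found, carried as an Option (break = keep the found value)
def loopA (n : Int) : Option String :=
  (PySem.List.pyRange 4 1001 1).foldl
    (fun acc i =>
      match acc with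
      | some s => some s
      | none => if isLuckyA i && (PySem.Int.mod n i == 0) then some "YES" else none)
    none

def func (args_0 : Int) : List String :=
  let n := args_0
  if isLuckyA n then
    ["YES"]
  else
    match loopA n with
    | some s => [s]
    | none => ["NO"]

-- ===== PORT B =====
-- set(str(n)) <= set('47')
def isLuckyB (n : Int) : Bool := (PySem.Int.toChars n).all (fun c => c == '4' || c == '7')

def luckyOne : List Int := [4, 7]
def luckyTwo : List Int := luckyOne.flatMap (fun a => luckyOne.map (fun b => 10 * a + b))
def luckyThree : List Int := luckyTwo.flatMap (fun a => luckyOne.map (fun b => 10 * a + b))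

def func_alt (args_0 : Int) : List String :=
  let n := args_0
  if isLuckyB n then
    ["YES"]
  else
    [if (luckyOne ++ luckyTwo ++ luckyThree).any (fun d => PySem.Int.mod n d == 0) then "YES" else "NO"]

-- ===== PRECONDITION & SPEC =====
def Spec_func (args_0 : Int) (out : List String) : Prop := out = func_alt args_0
instance (args_0 : Int) (out : List String) : Decidable (Spec_func args_0 out) := by unfold Spec_func; infer_instance

-- ===== CLAIM (what is proved, stated in full; the proofs are below) =====
def Claim_equal_func : Prop := ∀ (args_0 : Int), Dom_func args_0 → Spec_func args_0 (func args_0)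

-- ===== LEMMAS AND PROOFS =====

theorem isLuckyA_go_eq_all (cs : List Char) :
    isLuckyA_go cs = cs.all (fun c => c == '4' || c == '7') := by
  induction cs with
  | nil => rfl
  | cons c cs ih =>
      cases h : (c == '4' || c == '7') <;> simp [isLuckyA_go, List.all_cons, h, ih]

theorem isLucky_eq (n : Int) : isLuckyA n = isLuckyB n := by
  simp [isLuckyA, isLuckyB, isLuckyA_go_eq_all]

theorem foldl_break_some (p : Int → Bool) (xs : List Int) (s : String) :
    xs.foldl (fun acc i => match acc with
      | some t => some t
      | none => if p i then some "YES" else none) (some s) = some s := by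
  induction xs with
  | nil => rfl
  | cons x xs ih => simpa using ih

theorem foldl_break_eq_any (p : Int → Bool) (xs : List Int) :
    xs.foldl (fun acc i => match acc with
      | some t => some t
      | none => if p i then some "YES" else none) none
    = if xs.any p then some "YES" else none := by
  induction xs with
  | nil => rfl
  | cons x xs ih =>
      by_cases h : p x = true
      · simp [List.foldl_cons, List.any_cons, h, foldl_break_some]
      · simp [List.foldl_cons, List.any_cons, h, ih]

theorem filter_lucky_range :
    (PySem.List.pyRange 4 1001 1).filter isLuckyA = luckyOne ++ luckyTwo ++ luckyThree := by
  set_option maxRecDepth 100000 in decide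

theorem loopA_eq (n : Int) :
    loopA n = if (luckyOne ++ luckyTwo ++ luckyThree).any (fun d => PySem.Int.mod n d == 0)
              then some "YES" else none := by
  unfold loopA
  rw [foldl_break_eq_any (fun i => isLuckyA i && (PySem.Int.mod n i == 0))]
  rw [← List.any_filter, filter_lucky_range]

-- ===== VERDICT (by name: the statement is the Claim_ definition above) =====
theorem func_spec : Claim_equal_func := by
  intro n _
  unfold Spec_func func func_alt
  dsimp only
  rw [isLucky_eq]
  by_cases h : isLuckyB n = true
  · simp [h]
  · simp only [h, if_neg, Bool.not_eq_true, loopA_eq]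
    cases h2 : (luckyOne ++ luckyTwo ++ luckyThree).any (fun d => PySem.Int.mod n d == 0) <;>
      rfl
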